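-- pv_equiv track=rewrite | github.com/JunsangKwon/Algorithm_Study | Programmers/Level1/신고 결과 받기.py | solution
-- ===== SOURCE A (Python) =====
-- def solution(id_list, report, k):
--     report_dic = {}
--     mail_dic = {}
--     mail_count_dic = {}
--     answer = []
--     report = list(set(report))
--     black_list = []
--
--     for i in range(len(id_list)):
--         report_dic[id_list[i]] = 0
--         mail_dic[id_list[i]] = []
--         mail_count_dic[id_list[i]] = 0
--
--     for i in range(len(report)):
--         info = report[i].split(" ")
--         report_dic[info[1]] += 1
--         mail_dic[info[1]].append(info[0])
--         if report_dic[info[1]] >= k: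
--             black_list.append(info[1])
--
--     black_list = list(set(black_list))
--
--     for black in black_list:
--         for i in range(len(mail_dic[black])):
--             mail_count_dic[mail_dic[black][i]] += 1
--
--     for i in range(len(id_list)):
--         answer.append(mail_count_dic[id_list[i]])
--
--     return answer
-- ===== SOURCE B (Python) =====
-- def solution(id_list, report, k):
--     uniq = set(report)
--     cnt = {u: 0 for u in id_list}
--     for r in uniq:
--         cnt[r.split(" ")[1]] += 1
--     black = {u for u, c in cnt.items() if c >= k}
--     credit = {u: 0 for u in id_list}
--     for r in uniq:
--         parts = r.split(" ")
--         if parts[1] in black: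
--             credit[parts[0]] += 1
--     return [credit[u] for u in id_list]
-- ===== Notes on version B (the rewrite author's own statement) =====
-- stated objective: simpler
-- what changed: B replaces A's per-reported mail-list dict and the blacklist-times-reporters nested walk by one count dict over the unique reports, a derived blacklist set, and a single membership-filtered pass over the unique report pairs crediting the reporter.
import Mathlib
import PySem

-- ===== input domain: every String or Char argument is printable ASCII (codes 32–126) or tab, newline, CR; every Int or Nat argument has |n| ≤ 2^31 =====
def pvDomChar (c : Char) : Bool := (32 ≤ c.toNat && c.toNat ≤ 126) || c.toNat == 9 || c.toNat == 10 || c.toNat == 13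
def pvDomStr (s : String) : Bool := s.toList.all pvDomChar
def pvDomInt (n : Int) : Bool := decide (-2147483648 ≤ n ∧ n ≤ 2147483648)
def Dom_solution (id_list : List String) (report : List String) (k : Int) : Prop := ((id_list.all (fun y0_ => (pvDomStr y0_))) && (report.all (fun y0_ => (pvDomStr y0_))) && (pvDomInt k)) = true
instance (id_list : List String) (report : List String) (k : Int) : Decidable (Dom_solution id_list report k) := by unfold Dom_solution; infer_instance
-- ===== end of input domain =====

-- B replaces A's mail-list dict and blacklist×reporters nested walk by a count dict over the
-- unique reports, a derived blacklist set, and one membership-filtered pass crediting reporters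
-- (objective: simpler). A rebinds only its local 'report'; neither argument is mutated.

-- ===== PORT A =====
def solution (id_list : List String) (report : List String) (k : Int) : List Int :=
  -- the seeding loop 'for i in range(len(id_list))' reads only id_list[i]: fold over id_list itself
  let seed := id_list.foldl
    (fun (t : PySem.Dict String Int × PySem.Dict String (List String) × PySem.Dict String Int) u =>
      (t.1.insert u 0, t.2.1.insert u ([] : List String), t.2.2.insert u 0))
    (PySem.Dict.empty, PySem.Dict.empty, PySem.Dict.empty)
  let reportU : PySem.Set String := PySem.Set.ofList report      -- report = list(set(report))
  let st := reportU.foldl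
    (fun (t : PySem.Dict String Int × PySem.Dict String (List String) × List String) r =>
      let info := (PySem.Str.split? r " ").getD []               -- sep ≠ "", so split? is `some`
      let i1 := (PySem.List.pyGet? info 1).getD ""               -- info[1]; IndexError excluded by Pre_
      let i0 := (PySem.List.pyGet? info 0).getD ""
      let rd := t.1.modify i1 0 (· + 1)                          -- report_dic[info[1]] += 1 (KeyError excluded by Pre_)
      let md := t.2.1.modify i1 [] (· ++ [i0])                   -- mail_dic[info[1]].append(info[0])
      let bl := if k ≤ rd.getD i1 0 then t.2.2 ++ [i1] else t.2.2
      (rd, md, bl))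
    (seed.1, seed.2.1, ([] : List String))
  let blackList : PySem.Set String := PySem.Set.ofList st.2.2    -- black_list = list(set(black_list))
  let mc := blackList.foldl
    (fun d black => (st.2.1.getD black []).foldl (fun d m => d.modify m 0 (· + 1)) d)
    seed.2.2                                                     -- mail_count_dic[...] += 1 (KeyError excluded by Pre_)
  id_list.map (fun u => mc.getD u 0)

-- ===== PORT B =====
def solution_alt (id_list : List String) (report : List String) (k : Int) : List Int :=
  let uniq : PySem.Set String := PySem.Set.ofList report
  let cnt := uniq.foldl
    (fun d r => d.modify ((PySem.List.pyGet? ((PySem.Str.split? r " ").getD []) 1).getD "") 0 (· + 1))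
    (id_list.foldl (fun (d : PySem.Dict String Int) u => d.insert u 0) PySem.Dict.empty)
    -- cnt[r.split(" ")[1]] += 1 (IndexError/KeyError excluded by Pre_)
  let black : PySem.Set String :=
    PySem.Set.ofList ((cnt.items.filter (fun p => k ≤ p.2)).map (fun p => p.1))
  let credit := uniq.foldl
    (fun d r =>
      let parts := (PySem.Str.split? r " ").getD []
      if PySem.Set.contains black ((PySem.List.pyGet? parts 1).getD "") then
        d.modify ((PySem.List.pyGet? parts 0).getD "") 0 (· + 1)   -- credit[parts[0]] += 1
      else d)
    (id_list.foldl (fun (d : PySem.Dict String Int) u => d.insert u 0) PySem.Dict.empty)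
  id_list.map (fun u => credit.getD u 0)

-- ===== PRECONDITION & SPEC =====
-- Pre_ excludes exactly the inputs on which A raises: a report whose split lacks a second field
-- (IndexError), whose reported user is not in id_list (KeyError), or whose reporter is not in
-- id_list while the reported user ends up blacklisted (KeyError in the mail-count loop).
def Pre_solution (id_list : List String) (report : List String) (k : Int) : Prop :=
  ∀ r ∈ report,
    2 ≤ ((PySem.Str.split? r " ").getD []).length ∧
    (PySem.List.pyGet? ((PySem.Str.split? r " ").getD []) 1).getD "" ∈ id_list ∧
    (k ≤ (((PySem.Set.ofList report).filter
            (fun r' => (PySem.List.pyGet? ((PySem.Str.split? r' " ").getD []) 1).getD "" ==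
                       (PySem.List.pyGet? ((PySem.Str.split? r " ").getD []) 1).getD "")).length : Int) →
      (PySem.List.pyGet? ((PySem.Str.split? r " ").getD []) 0).getD "" ∈ id_list)
instance (id_list : List String) (report : List String) (k : Int) : Decidable (Pre_solution id_list report k) := by unfold Pre_solution; infer_instance

def pvWitness_solution : List String × List String × Int :=
  (["muzi", "frodo", "apeach", "neo"],
   ["muzi frodo", "apeach frodo", "frodo neo", "muzi neo", "apeach muzi"], 2)

def Spec_solution (id_list : List String) (report : List String) (k : Int) (out : List Int) : Prop := out = solution_alt id_list report k
instance (id_list : List String) (report : List String) (k : Int) (out : List Int) : Decidable (Spec_solution id_list report k out) := by unfold Spec_solution; infer_instance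

-- ===== CLAIM (what is proved, stated in full; the proofs are below) =====
def Claim_equal_solution : Prop := ∀ (id_list : List String) (report : List String) (k : Int), Dom_solution id_list report k → Pre_solution id_list report k → Spec_solution id_list report k (solution id_list report k)

-- ===== LEMMAS AND PROOFS =====

-- the reported user / the reporter of a report line
def secF (r : String) : String := (PySem.List.pyGet? ((PySem.Str.split? r " ").getD []) 1).getD ""
def fstF (r : String) : String := (PySem.List.pyGet? ((PySem.Str.split? r " ").getD []) 0).getD ""

-- named step functions (definitionally the ports' loop bodies)
def seedStep (t : PySem.Dict String Int × PySem.Dict String (List String) × PySem.Dict String Int)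
    (u : String) : PySem.Dict String Int × PySem.Dict String (List String) × PySem.Dict String Int :=
  (t.1.insert u 0, t.2.1.insert u ([] : List String), t.2.2.insert u 0)

def cntStep (d : PySem.Dict String Int) (r : String) : PySem.Dict String Int :=
  d.modify (secF r) 0 (· + 1)

def mailStep (m : PySem.Dict String (List String)) (r : String) : PySem.Dict String (List String) :=
  m.modify (secF r) [] (· ++ [fstF r])

def trioStep (k : Int)
    (t : PySem.Dict String Int × PySem.Dict String (List String) × List String) (r : String) :
    PySem.Dict String Int × PySem.Dict String (List String) × List String :=
  (cntStep t.1 r, mailStep t.2.1 r,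
   if k ≤ (cntStep t.1 r).getD (secF r) 0 then t.2.2 ++ [secF r] else t.2.2)

-- the common value both ports compute
def specOut (id_list report : List String) (k : Int) : List Int :=
  id_list.map (fun u =>
    ((PySem.Set.ofList report).countP (fun x =>
        (fstF x == u) &&
        decide (k ≤ ((((PySem.Set.ofList report).map secF).count (secF x) : Int)))) : Int))

-- restatements of the ports with named step functions (definitional)
lemma solution_eq (id_list report : List String) (k : Int) :
    solution id_list report k =
      (let seed := id_list.foldl seedStep (PySem.Dict.empty, PySem.Dict.empty, PySem.Dict.empty)
       let st := (PySem.Set.ofList report).foldl (trioStep k) (seed.1, seed.2.1, ([] : List String))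
       let mc := (PySem.Set.ofList st.2.2).foldl
         (fun d black => (st.2.1.getD black []).foldl (fun d m => d.modify m 0 (· + 1)) d)
         seed.2.2
       id_list.map (fun u => mc.getD u 0)) := rfl

lemma solution_alt_eq (id_list report : List String) (k : Int) :
    solution_alt id_list report k =
      (let cnt := (PySem.Set.ofList report).foldl cntStep
         (id_list.foldl (fun (d : PySem.Dict String Int) x => d.insert x 0) PySem.Dict.empty)
       let black : PySem.Set String :=
         PySem.Set.ofList ((cnt.items.filter (fun p => k ≤ p.2)).map (fun p => p.1))
       let credit := (PySem.Set.ofList report).foldl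
         (fun d r => if PySem.Set.contains black (secF r) then d.modify (fstF r) 0 (· + 1) else d)
         (id_list.foldl (fun (d : PySem.Dict String Int) x => d.insert x 0) PySem.Dict.empty)
       id_list.map (fun u => credit.getD u 0)) := rfl

-- seeding a constant value c leaves every getD-with-default-c at c
lemma seed_const_getD {ν : Type} (c : ν) (u : String) (l : List String) :
    ∀ (d : PySem.Dict String ν), d.getD u c = c →
      (l.foldl (fun d x => d.insert x c) d).getD u c = c := by
  induction l with
  | nil => intro d h; simpa using h
  | cons x xs ih =>
      intro d h
      simp only [List.foldl_cons]
      apply ih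
      rw [PySem.Dict.getD_insert]
      split_ifs <;> simp [h]

lemma seed_proj (l : List String) :
    ∀ d1 d2 d3, l.foldl seedStep (d1, d2, d3) =
      (l.foldl (fun d x => d.insert x (0 : Int)) d1,
       l.foldl (fun d x => d.insert x ([] : List String)) d2,
       l.foldl (fun d x => d.insert x (0 : Int)) d3) := by
  induction l with
  | nil => intro d1 d2 d3; rfl
  | cons x xs ih => intro d1 d2 d3; simp only [List.foldl_cons, seedStep]; exact ih _ _ _

lemma trio_proj (k : Int) (l : List String) :
    ∀ d m b, l.foldl (trioStep k) (d, m, b) =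
      (l.foldl cntStep d, l.foldl mailStep m, (l.foldl (trioStep k) (d, m, b)).2.2) := by
  induction l with
  | nil => intro d m b; rfl
  | cons x xs ih =>
      intro d m b
      simp only [List.foldl_cons]
      rw [show trioStep k (d, m, b) x =
            (cntStep d x, mailStep m x,
             if k ≤ (cntStep d x).getD (secF x) 0 then b ++ [secF x] else b) from rfl]
      rw [ih]

lemma cnt_getD (u : String) (l : List String) :
    ∀ (d : PySem.Dict String Int),
      (l.foldl cntStep d).getD u 0 = d.getD u 0 + ((l.map secF).count u : Int) := by
  induction l with
  | nil => intro d; simp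
  | cons x xs ih =>
      intro d
      simp only [List.foldl_cons, List.map_cons, ih]
      rw [show cntStep d x = d.modify (secF x) 0 (· + 1) from rfl, PySem.Dict.getD_modify]
      rcases eq_or_ne u (secF x) with h | h
      · simp only [h, List.count_cons, beq_self_eq_true, if_pos]
        push_cast
        ring
      · simp only [if_neg h, List.count_cons]
        have : ¬ (secF x == u) = true := by simpa using Ne.symm h
        simp [this]

lemma mail_getD (b : String) (l : List String) :
    ∀ (m : PySem.Dict String (List String)),
      (l.foldl mailStep m).getD b [] =
        m.getD b [] ++ ((l.filter (fun r => secF r == b)).map fstF) := by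
  induction l with
  | nil => intro m; simp
  | cons x xs ih =>
      intro m
      simp only [List.foldl_cons, ih]
      rw [show mailStep m x = m.modify (secF x) [] (· ++ [fstF x]) from rfl, PySem.Dict.getD_modify]
      rcases eq_or_ne b (secF x) with h | h
      · simp [h.symm]
      · have : ¬ (secF x == b) = true := by simpa using Ne.symm h
        simp [h, this]

-- membership in A's running black_list
lemma trio_bl (k : Int) (u : String) (l : List String) :
    ∀ (d : PySem.Dict String Int) (m : PySem.Dict String (List String)) (b : List String),
      u ∈ (l.foldl (trioStep k) (d, m, b)).2.2 ↔
        u ∈ b ∨ (u ∈ l.map secF ∧ k ≤ d.getD u 0 + ((l.map secF).count u : Int)) := by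
  induction l with
  | nil => intro d m b; simp
  | cons x xs ih =>
      intro d m b
      simp only [List.foldl_cons]
      rw [show trioStep k (d, m, b) x =
            (cntStep d x, mailStep m x,
             if k ≤ (cntStep d x).getD (secF x) 0 then b ++ [secF x] else b) from rfl]
      rw [ih]
      have hgd : ∀ v : String,
          (cntStep d x).getD v 0 = if v = secF x then d.getD v 0 + 1 else d.getD v 0 := by
        intro v
        rw [show cntStep d x = d.modify (secF x) 0 (· + 1) from rfl, PySem.Dict.getD_modify]
        split_ifs with hv
        · rw [hv]
        · rfl
      rcases eq_or_ne u (secF x) with h | h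
      · rw [hgd u, if_pos h]
        have hcnt : (((x :: xs).map secF).count u : Int) = ((xs.map secF).count u : Int) + 1 := by
          simp [h]
        constructor
        · rintro (hmem | ⟨hm, hle⟩)
          · by_cases hk : k ≤ d.getD u 0 + 1
            · refine Or.inr ⟨by simp [h], ?_⟩
              have h0 : (0 : Int) ≤ ((xs.map secF).count u : Int) := Int.natCast_nonneg _
              omega
            · rw [← h, if_neg (by rw [hgd u, if_pos h]; exact hk)] at hmem
              exact Or.inl hmem
          · refine Or.inr ⟨by simp [h], ?_⟩
            rw [hcnt]
            omega
        · rintro (hmem | ⟨hm, hle⟩)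
          · by_cases hk : k ≤ d.getD u 0 + 1
            · rw [← h, if_pos (by rw [hgd u, if_pos h]; exact hk)]
              exact Or.inl (List.mem_append_left _ hmem)
            · rw [← h, if_neg (by rw [hgd u, if_pos h]; exact hk)]
              exact Or.inl hmem
          · by_cases hk : k ≤ d.getD u 0 + 1
            · rw [← h, if_pos (by rw [hgd u, if_pos h]; exact hk)]
              exact Or.inl (by simp [h])
            · rw [← h, if_neg (by rw [hgd u, if_pos h]; exact hk)]
              right
              have hxm : u ∈ xs.map secF := by
                by_contra hnm
                have hz : (xs.map secF).count u = 0 := List.count_eq_zero.mpr hnm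
                rw [hcnt, hz] at hle
                simp at hle
                omega
              refine ⟨hxm, ?_⟩
              rw [hcnt] at hle
              omega
      · rw [hgd u, if_neg h]
        have hmem : (u ∈ List.map secF (x :: xs)) ↔ u ∈ xs.map secF := by simp [h]
        have hcnt : (((x :: xs).map secF).count u : Int) = ((xs.map secF).count u : Int) := by
          have : ¬ (secF x == u) = true := by simpa using Ne.symm h
          simp [List.count_cons, this]
        have hb : (u ∈ if k ≤ (cntStep d x).getD (secF x) 0 then b ++ [secF x] else b) ↔ u ∈ b := by
          split_ifs
          · simp [h]
          · exact Iff.rfl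
        rw [hb, hmem, hcnt]

lemma mc_getD (md : PySem.Dict String (List String)) (u : String) (bl : List String) :
    ∀ (d : PySem.Dict String Int),
      (bl.foldl (fun d black => (md.getD black []).foldl (fun d m => d.modify m 0 (· + 1)) d) d).getD u 0 =
        d.getD u 0 + (bl.map (fun b => ((md.getD b []).count u : Int))).sum := by
  induction bl with
  | nil => intro d; simp
  | cons x xs ih =>
      intro d
      simp only [List.foldl_cons, List.map_cons, List.sum_cons, ih]
      rw [PySem.Dict.getD_foldl_modify_add_one]
      ring

lemma credit_getD (s : PySem.Set String) (u : String) (l : List String) :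
    ∀ (d : PySem.Dict String Int),
      (l.foldl (fun d r => if PySem.Set.contains s (secF r) then d.modify (fstF r) 0 (· + 1) else d) d).getD u 0 =
        d.getD u 0 + (l.countP (fun r => PySem.Set.contains s (secF r) && (fstF r == u)) : Int) := by
  induction l with
  | nil => intro d; simp
  | cons x xs ih =>
      intro d
      simp only [List.foldl_cons, ih, List.countP_cons]
      by_cases hs : PySem.Set.contains s (secF x) = true
      · rw [if_pos hs, PySem.Dict.getD_modify]
        rcases eq_or_ne u (fstF x) with h | h
        · have hb : (PySem.Set.contains s (secF x) && (fstF x == u)) = true := by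
            simp [h.symm, (PySem.Set.contains_iff s (secF x)).mp hs]
          rw [if_pos h, if_pos hb, h]
          push_cast
          omega
        · have hne : (fstF x == u) = false := beq_eq_false_iff_ne.mpr (Ne.symm h)
          rw [if_neg h, if_neg (by simp [hne])]
          push_cast
          omega
      · have hs' : secF x ∉ s := fun hm => hs ((PySem.Set.contains_iff s (secF x)).mpr hm)
        rw [if_neg hs, if_neg (by simp [hs'])]
        push_cast
        omega

-- splitting a countP along a disjoint disjunction
lemma countP_split (L : List String) (p q1 q2 : String → Bool)
    (hdisj : ∀ x, ¬(q1 x = true ∧ q2 x = true)) :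
    L.countP (fun x => p x && (q1 x || q2 x)) =
      L.countP (fun x => p x && q1 x) + L.countP (fun x => p x && q2 x) := by
  induction L with
  | nil => simp
  | cons a l ih =>
      simp only [List.countP_cons, ih]
      have := hdisj a
      rcases h1 : q1 a <;> rcases h2 : q2 a <;> rcases hp : p a <;> simp_all <;> omega

-- summing per-blacklisted-user mail counts = one filtered count
lemma sum_countP (L : List String) (u : String) (bl : List String) (hnd : bl.Nodup) :
    (bl.map (fun b => (L.countP (fun x => (fstF x == u) && (secF x == b)) : Int))).sum =
      (L.countP (fun x => (fstF x == u) && decide (secF x ∈ bl)) : Int) := by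
  induction bl with
  | nil => simp
  | cons b rest ih =>
      rcases List.nodup_cons.mp hnd with ⟨hb, hrest⟩
      simp only [List.map_cons, List.sum_cons, ih hrest]
      have hsplit : L.countP (fun x => (fstF x == u) && decide (secF x ∈ b :: rest)) =
          L.countP (fun x => (fstF x == u) && (secF x == b)) +
            L.countP (fun x => (fstF x == u) && decide (secF x ∈ rest)) := by
        have hc := countP_split L (fun x => fstF x == u) (fun x => secF x == b)
          (fun x => decide (secF x ∈ rest))
          (by
            intro x hx
            rcases hx with ⟨h1, h2⟩
            have h1' : secF x = b := by simpa using h1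
            have h2' : secF x ∈ rest := by simpa using h2
            exact hb (h1' ▸ h2'))
        rw [← hc]
        apply List.countP_congr
        intro x _
        simp [List.mem_cons]
      rw [hsplit]
      push_cast
      ring

-- A computes specOut
lemma A_eq_spec (id_list report : List String) (k : Int) :
    solution id_list report k = specOut id_list report k := by
  rw [solution_eq]
  dsimp only
  rw [seed_proj]
  dsimp only
  rw [trio_proj]
  dsimp only
  unfold specOut
  apply List.map_congr_left
  intro u _
  rw [mc_getD]
  have hseed1getD : ∀ v, (id_list.foldl (fun d x => d.insert x (0 : Int)) PySem.Dict.empty).getD v 0 = 0 :=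
    fun v => seed_const_getD 0 v id_list PySem.Dict.empty (by simp)
  have hseed2getD : ∀ v, (id_list.foldl (fun d x => d.insert x ([] : List String)) PySem.Dict.empty).getD v [] = [] :=
    fun v => seed_const_getD [] v id_list PySem.Dict.empty (by simp)
  rw [hseed1getD u, zero_add]
  have hcount : ∀ b,
      (((PySem.Set.ofList report).foldl mailStep
          (id_list.foldl (fun d x => d.insert x ([] : List String)) PySem.Dict.empty)).getD b []).count u =
        (PySem.Set.ofList report).countP (fun x => (fstF x == u) && (secF x == b)) := by
    intro b
    rw [mail_getD, hseed2getD, List.nil_append, List.count_eq_countP, List.countP_map,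
      List.countP_filter]
    apply List.countP_congr
    intro x _
    simp [Function.comp]
  have hmap :
      (PySem.Set.ofList ((((PySem.Set.ofList report)).foldl (trioStep k)
          (id_list.foldl (fun d x => d.insert x (0 : Int)) PySem.Dict.empty,
           id_list.foldl (fun d x => d.insert x ([] : List String)) PySem.Dict.empty,
           ([] : List String))).2.2)).map
        (fun b => ((((PySem.Set.ofList report).foldl mailStep
          (id_list.foldl (fun d x => d.insert x ([] : List String)) PySem.Dict.empty)).getD b []).count u : Int)) =
      (PySem.Set.ofList ((((PySem.Set.ofList report)).foldl (trioStep k)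
          (id_list.foldl (fun d x => d.insert x (0 : Int)) PySem.Dict.empty,
           id_list.foldl (fun d x => d.insert x ([] : List String)) PySem.Dict.empty,
           ([] : List String))).2.2)).map
        (fun b => ((PySem.Set.ofList report).countP (fun x => (fstF x == u) && (secF x == b)) : Int)) :=
    List.map_congr_left (fun b _ => by rw [hcount b])
  rw [hmap, sum_countP _ _ _ (PySem.Set.nodup_ofList _)]
  congr 1
  apply List.countP_congr
  intro x hx
  have hxsec : secF x ∈ (PySem.Set.ofList report).map secF := List.mem_map_of_mem hx
  have hmemA : secF x ∈ PySem.Set.ofList ((((PySem.Set.ofList report)).foldl (trioStep k)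
      (id_list.foldl (fun d x => d.insert x (0 : Int)) PySem.Dict.empty,
       id_list.foldl (fun d x => d.insert x ([] : List String)) PySem.Dict.empty,
       ([] : List String))).2.2) ↔
      k ≤ (((PySem.Set.ofList report).map secF).count (secF x) : Int) := by
    rw [PySem.Set.mem_ofList, trio_bl, hseed1getD, zero_add]
    constructor
    · rintro (h | ⟨_, h⟩)
      · simp at h
      · exact h
    · intro h
      exact Or.inr ⟨hxsec, h⟩
  simp [hmemA]

-- membership in B's black set, for a dict with Nodup keys
lemma mem_blackB (cnt : PySem.Dict String Int) (hnd : cnt.keys.Nodup) (k : Int) (u : String) :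
    u ∈ ((cnt.items.filter (fun p => k ≤ p.2)).map (fun p => p.1)) ↔
      u ∈ cnt.keys ∧ k ≤ cnt.getD u 0 := by
  rw [PySem.Dict.items_eq_map_keys cnt hnd 0]
  constructor
  · intro h
    obtain ⟨p, hp, rfl⟩ := List.mem_map.mp h
    obtain ⟨hpm, hpk⟩ := List.mem_filter.mp hp
    obtain ⟨x, hx, rfl⟩ := List.mem_map.mp hpm
    exact ⟨hx, by simpa using hpk⟩
  · rintro ⟨hu, hk⟩
    exact List.mem_map.mpr ⟨(u, cnt.getD u 0),
      List.mem_filter.mpr ⟨List.mem_map.mpr ⟨u, hu, rfl⟩, by simpa using hk⟩, rfl⟩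

-- B computes specOut
lemma B_eq_spec (id_list report : List String) (k : Int) :
    solution_alt id_list report k = specOut id_list report k := by
  rw [solution_alt_eq]
  dsimp only
  unfold specOut
  have hcnt0getD : ∀ v,
      (id_list.foldl (fun (d : PySem.Dict String Int) x => d.insert x 0) PySem.Dict.empty).getD v 0 = 0 :=
    fun v => seed_const_getD 0 v id_list PySem.Dict.empty (by simp)
  have hcntgetD : ∀ v,
      (((PySem.Set.ofList report)).foldl cntStep
        (id_list.foldl (fun (d : PySem.Dict String Int) x => d.insert x 0) PySem.Dict.empty)).getD v 0 =
        (((PySem.Set.ofList report).map secF).count v : Int) := by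
    intro v
    rw [cnt_getD, hcnt0getD, zero_add]
  have hkeysnd :
      (((PySem.Set.ofList report)).foldl cntStep
        (id_list.foldl (fun (d : PySem.Dict String Int) x => d.insert x 0) PySem.Dict.empty)).keys.Nodup := by
    show ((PySem.Set.ofList report).foldl
      (fun (d : PySem.Dict String Int) r => d.modify (secF r) 0 (· + 1))
      (id_list.foldl (fun (d : PySem.Dict String Int) x => d.insert x 0) PySem.Dict.empty)).keys.Nodup
    exact PySem.Dict.nodup_keys_foldl_modify_key _ secF 0 (fun _ _ v => v + 1) _
      (PySem.Dict.nodup_keys_foldl_insert id_list (fun _ _ => 0) PySem.Dict.empty (by simp))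
  have hkeys : ∀ v, v ∈ (PySem.Set.ofList report).map secF →
      v ∈ (((PySem.Set.ofList report)).foldl cntStep
        (id_list.foldl (fun (d : PySem.Dict String Int) x => d.insert x 0) PySem.Dict.empty)).keys := by
    intro v hv
    show v ∈ ((PySem.Set.ofList report).foldl
      (fun (d : PySem.Dict String Int) r => d.modify (secF r) 0 (· + 1))
      (id_list.foldl (fun (d : PySem.Dict String Int) x => d.insert x 0) PySem.Dict.empty)).keys
    rw [PySem.Dict.keys_foldl_modify_key _ secF 0 (fun _ _ v => v + 1) _]
    rw [PySem.Set.mem_update]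
    exact Or.inr hv
  apply List.map_congr_left
  intro u _
  rw [credit_getD, hcnt0getD, zero_add]
  congr 1
  apply List.countP_congr
  intro x hx
  have hxsec : secF x ∈ (PySem.Set.ofList report).map secF := List.mem_map_of_mem hx
  have hblack : PySem.Set.contains
      (PySem.Set.ofList
        (((((PySem.Set.ofList report)).foldl cntStep
            (id_list.foldl (fun (d : PySem.Dict String Int) x => d.insert x 0) PySem.Dict.empty)).items.filter
          (fun p => k ≤ p.2)).map (fun p => p.1))) (secF x) = true ↔
      k ≤ (((PySem.Set.ofList report).map secF).count (secF x) : Int) := by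
    rw [PySem.Set.contains_iff, PySem.Set.mem_ofList, mem_blackB _ hkeysnd]
    rw [hcntgetD]
    constructor
    · rintro ⟨_, h⟩; exact h
    · intro h; exact ⟨hkeys _ hxsec, h⟩
  constructor
  · intro h
    obtain ⟨h1, h2⟩ := Bool.and_eq_true_iff.mp h
    exact Bool.and_eq_true_iff.mpr ⟨h2, by simpa using hblack.mp h1⟩
  · intro h
    obtain ⟨h1, h2⟩ := Bool.and_eq_true_iff.mp h
    exact Bool.and_eq_true_iff.mpr ⟨hblack.mpr (by simpa using h2), h1⟩

-- ===== VERDICT (by name: the statement is the Claim_ definition above) =====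
theorem solution_spec : Claim_equal_solution := by
  intro id_list report k _ _
  unfold Spec_solution
  rw [A_eq_spec, B_eq_spec]
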